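-- pv_equiv track=rewrite | github.com/Sikong8080/jx3-raid-manager-auto | cankao/main.py | match_record_pairs
-- ===== SOURCE A (Python) =====
-- def match_record_pairs(start_positions, end_positions):
--     matched_pairs = []
--     used_starts = set()
--     used_ends = set()
--     for start_idx, start_time, start_text, start_dungeon_info in start_positions:
--         if start_idx in used_starts:
--             continue
--         possible_ends = [
--             (idx, t, txt, dungeon_info) for idx, t, txt, dungeon_info in end_positions
--             if idx > start_idx and idx not in used_ends and dungeon_info == start_dungeon_info
--         ]
--         if possible_ends:
--             end_idx, end_time, end_text, end_dungeon_info = min(possible_ends, key=lambda x: x[0])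
--             matched_pairs.append((start_idx, end_idx, start_time, end_time, start_text, end_text, start_dungeon_info))
--             used_starts.add(start_idx)
--             used_ends.add(end_idx)
--     return matched_pairs
-- ===== SOURCE B (Python) =====
-- def match_record_pairs(start_positions, end_positions):
--     # Sort the end records by idx once; each start takes the first matching end
--     # in that sorted order, which is then physically deleted (all ends sharing
--     # its idx) instead of tracking a used_ends set; duplicate matched starts are
--     # detected by scanning the output built so far.
--     remaining = sorted(end_positions, key=lambda e: e[0])
--     matched_pairs = []
--     for start_idx, start_time, start_text, start_dungeon_info in start_positions:
--         if any(m[0] == start_idx for m in matched_pairs):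
--             continue
--         for end_idx, end_time, end_text, dungeon_info in remaining:
--             if end_idx > start_idx and dungeon_info == start_dungeon_info:
--                 matched_pairs.append((start_idx, end_idx, start_time, end_time,
--                                       start_text, end_text, start_dungeon_info))
--                 remaining = [e for e in remaining if e[0] != end_idx]
--                 break
--     return matched_pairs
-- ===== Notes on version B (the rewrite author's own statement) =====
-- stated objective: alternative
-- what changed: B sorts the end records by idx once and then, per start, takes the first eligible end of the sorted list and deletes its idx from it, with duplicate matched starts detected by scanning the output so far - no used_starts/used_ends sets and no per-start filter-all-ends-then-min pass.
import Mathlib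
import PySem

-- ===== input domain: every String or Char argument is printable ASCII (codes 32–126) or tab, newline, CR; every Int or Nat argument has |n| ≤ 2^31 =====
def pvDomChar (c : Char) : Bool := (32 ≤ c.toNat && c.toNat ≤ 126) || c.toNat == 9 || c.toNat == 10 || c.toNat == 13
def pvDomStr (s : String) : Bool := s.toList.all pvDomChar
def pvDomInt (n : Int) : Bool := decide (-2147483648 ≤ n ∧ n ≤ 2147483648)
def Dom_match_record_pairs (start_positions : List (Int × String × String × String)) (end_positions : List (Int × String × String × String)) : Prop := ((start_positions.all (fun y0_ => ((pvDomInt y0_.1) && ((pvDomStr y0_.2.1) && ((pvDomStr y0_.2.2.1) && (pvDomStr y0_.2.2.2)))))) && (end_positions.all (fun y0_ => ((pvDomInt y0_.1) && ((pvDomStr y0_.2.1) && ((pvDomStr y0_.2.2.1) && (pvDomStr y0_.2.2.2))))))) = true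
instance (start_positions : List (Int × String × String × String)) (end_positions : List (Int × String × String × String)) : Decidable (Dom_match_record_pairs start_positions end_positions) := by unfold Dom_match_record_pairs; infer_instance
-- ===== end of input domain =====

-- B sorts the end records by idx once and then, per start, takes the first eligible
-- end of the sorted list and deletes its idx from it (no used_ends set), detecting
-- duplicate matched starts by scanning the output so far (objective: alternative).

-- ===== PORT A =====
-- loop body of A's 'for start_idx, … in start_positions' (state: matched_pairs, used_starts, used_ends)
def pvStepA (end_positions : List (Int × String × String × String))
    (st : List (Int × Int × String × String × String × String × String) × PySem.Set Int × PySem.Set Int)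
    (s : Int × String × String × String) :
    List (Int × Int × String × String × String × String × String) × PySem.Set Int × PySem.Set Int :=
  if PySem.Set.contains st.2.1 s.1 then st
  else
    -- possible_ends: the comprehension rebuilds the same 4-tuples, so it is a filter
    let possible_ends := end_positions.filter
      (fun e => (decide (e.1 > s.1) && !(PySem.Set.contains st.2.2 e.1)) && (e.2.2.2 == s.2.2.2))
    -- 'if possible_ends: … min(possible_ends, key=lambda x: x[0])' = match on min? (none iff empty)
    match PySem.List.min? possible_ends (fun x => x.1) with
    | none => st
    | some e => (st.1 ++ [(s.1, e.1, s.2.1, e.2.1, s.2.2.1, e.2.2.1, s.2.2.2)],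
                 PySem.Set.add st.2.1 s.1, PySem.Set.add st.2.2 e.1)

def match_record_pairs (start_positions : List (Int × String × String × String)) (end_positions : List (Int × String × String × String)) : List (Int × Int × String × String × String × String × String) :=
  (start_positions.foldl (pvStepA end_positions)
    ([], (PySem.Set.empty : PySem.Set Int), (PySem.Set.empty : PySem.Set Int))).1

-- ===== PORT B =====
-- B's main loop, a structural recursion over start_positions carrying
-- (matched_pairs, remaining); the inner for-with-break is find?, the
-- 'remaining = [e for e in remaining if ...]' rebuild is a filter, and
-- 'any(m[0] == start_idx for m in matched_pairs)' is List.any on the output.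
def pvLoopB (pairs : List (Int × Int × String × String × String × String × String))
    (remaining : List (Int × String × String × String)) :
    List (Int × String × String × String) →
    List (Int × Int × String × String × String × String × String)
  | [] => pairs
  | s :: rest =>
    if pairs.any (fun m => m.1 == s.1) then pvLoopB pairs remaining rest
    else
      match remaining.find? (fun e => decide (e.1 > s.1) && (e.2.2.2 == s.2.2.2)) with
      | none => pvLoopB pairs remaining rest
      | some e =>
          pvLoopB (pairs ++ [(s.1, e.1, s.2.1, e.2.1, s.2.2.1, e.2.2.1, s.2.2.2)])
            (remaining.filter (fun x => !(x.1 == e.1))) rest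

def match_record_pairs_alt (start_positions : List (Int × String × String × String)) (end_positions : List (Int × String × String × String)) : List (Int × Int × String × String × String × String × String) :=
  pvLoopB [] (PySem.List.sorted end_positions (fun e => e.1)) start_positions

-- ===== PRECONDITION & SPEC =====
def Spec_match_record_pairs (start_positions : List (Int × String × String × String)) (end_positions : List (Int × String × String × String)) (out : List (Int × Int × String × String × String × String × String)) : Prop := out = match_record_pairs_alt start_positions end_positions
instance (start_positions : List (Int × String × String × String)) (end_positions : List (Int × String × String × String)) (out : List (Int × Int × String × String × String × String × String)) : Decidable (Spec_match_record_pairs start_positions end_positions out) := by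
  unfold Spec_match_record_pairs
  haveI h7 : DecidableEq (Int × Int × String × String × String × String × String) := instDecidableEqProd
  haveI hL : DecidableEq (List (Int × Int × String × String × String × String × String)) := instDecidableEqList
  infer_instance

-- ===== CLAIM (what is proved, stated in full; the proofs are below) =====
def Claim_equal_match_record_pairs : Prop := ∀ (start_positions : List (Int × String × String × String)) (end_positions : List (Int × String × String × String)), Dom_match_record_pairs start_positions end_positions → Spec_match_record_pairs start_positions end_positions (match_record_pairs start_positions end_positions)

-- ===== LEMMAS AND PROOFS =====

-- sorting l ++ [x] is inserting x into sorted l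
theorem pv_sorted_append_singleton {α : Type} (l : List α) (x : α) (key : α → Int) :
    PySem.List.sorted (l ++ [x]) key
      = PySem.List.insertBy (fun a b => decide (key a < key b)) x (PySem.List.sorted l key) := by
  rw [PySem.List.sorted_eq_foldl_insertBy, PySem.List.sorted_eq_foldl_insertBy, List.foldl_append]
  rfl

-- one more element on the right of a running min
theorem pv_min?_append_singleton {α : Type} (ys : List α) (x : α) (key : α → Int) :
    PySem.List.min? (ys ++ [x]) key
      = match PySem.List.min? ys key with
        | none => some x
        | some m => if key x < key m then some x else some m := by
  unfold PySem.List.min?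
  rw [List.foldl_append]
  rfl

-- find? through an ordered insertion, on a key-sorted list
theorem pv_find?_insertBy {α : Type} (key : α → Int) (p : α → Bool) (x : α) :
    ∀ (s : List α), s.Pairwise (fun a b => key a ≤ key b) →
    List.find? p (PySem.List.insertBy (fun a b => decide (key a < key b)) x s)
      = match List.find? p s with
        | none => if p x then some x else none
        | some m => if p x && decide (key x < key m) then some x else some m := by
  intro s
  induction s with
  | nil =>
    intro _
    simp [PySem.List.insertBy, List.find?]
  | cons y ys ih =>
    intro hpw
    have hy : ∀ z ∈ ys, key y ≤ key z := fun z hz => (List.pairwise_cons.mp hpw).1 z hz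
    have hpys : ys.Pairwise (fun a b => key a ≤ key b) := (List.pairwise_cons.mp hpw).2
    by_cases hlt : key x < key y
    · have hins : PySem.List.insertBy (fun a b => decide (key a < key b)) x (y :: ys)
          = x :: y :: ys := by simp [PySem.List.insertBy, hlt]
      rw [hins]
      rcases hfind : List.find? p (y :: ys) with _ | m
      · cases hx : p x <;> simp [hx, hfind]
      · have hm : m ∈ y :: ys := List.mem_of_find?_eq_some hfind
        have hym : key y ≤ key m := by
          rcases List.mem_cons.mp hm with h | h
          · rw [h]
          · exact hy m h
        have hxm : key x < key m := lt_of_lt_of_le hlt hym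
        cases hx : p x <;> simp [hx, hfind, hxm]
    · have hins : PySem.List.insertBy (fun a b => decide (key a < key b)) x (y :: ys)
          = y :: PySem.List.insertBy (fun a b => decide (key a < key b)) x ys := by
        simp [PySem.List.insertBy, hlt]
      rw [hins]
      cases hpy : p y
      · simp only [List.find?_cons, hpy]
        exact ih hpys
      · simp only [List.find?_cons, hpy]
        rcases hx : p x <;> simp [hlt]

-- first hit in the sorted list = Python min of the filtered list
theorem pv_find?_sorted_eq_min?_filter {α : Type} (key : α → Int) (p : α → Bool) (l : List α) :
    List.find? p (PySem.List.sorted l key)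
      = PySem.List.min? (l.filter p) key := by
  induction l using List.reverseRecOn with
  | nil => rfl
  | append_singleton l x ih =>
    rw [pv_sorted_append_singleton, pv_find?_insertBy key p x _ (PySem.List.sorted_pairwise l key), ih]
    rw [List.filter_append]
    cases hx : p x
    · simp only [List.filter_cons, hx, Bool.false_eq_true, if_false, List.filter_nil, List.append_nil]
      rcases hm : PySem.List.min? (l.filter p) key with _ | m <;> simp_all
    · simp only [List.filter_cons, hx, if_true, List.filter_nil]
      rw [pv_min?_append_singleton]
      rcases hm : PySem.List.min? (l.filter p) key with _ | m <;> simp_all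

-- find? on a filtered list folds the two predicates together
theorem pv_find?_filter {α : Type} (p q : α → Bool) (l : List α) :
    List.find? p (l.filter q) = List.find? (fun a => q a && p a) l := by
  induction l with
  | nil => rfl
  | cons x xs ih =>
    cases hq : q x <;> cases hp : p x <;>
      simp [hq, hp, ih]

-- membership in a set after add, as a Bool
theorem pv_contains_add (U : PySem.Set Int) (k x : Int) :
    PySem.Set.contains (PySem.Set.add U k) x = (PySem.Set.contains U x || x == k) := by
  rw [Bool.eq_iff_iff, PySem.Set.contains_iff, PySem.Set.mem_add U k x, Bool.or_eq_true,
      PySem.Set.contains_iff, beq_iff_eq]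

-- the simulation invariant tying A's state to B's
def pvInv (ep : List (Int × String × String × String))
    (stA : List (Int × Int × String × String × String × String × String) × PySem.Set Int × PySem.Set Int)
    (remaining : List (Int × String × String × String)) : Prop :=
  (∀ x : Int, PySem.Set.contains stA.2.1 x = stA.1.any (fun m => m.1 == x)) ∧
  remaining = (PySem.List.sorted ep (fun e => e.1)).filter
      (fun e => !(PySem.Set.contains stA.2.2 e.1))

-- one step preserves the invariant and produces equal outputs
theorem pv_sim (ep : List (Int × String × String × String)) :
    ∀ (sps : List (Int × String × String × String))
      (stA : List (Int × Int × String × String × String × String × String) × PySem.Set Int × PySem.Set Int)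
      (remaining : List (Int × String × String × String)),
      pvInv ep stA remaining →
      (sps.foldl (pvStepA ep) stA).1 = pvLoopB stA.1 remaining sps := by
  intro sps
  induction sps with
  | nil => intro stA remaining _; rfl
  | cons s rest ih =>
    intro stA remaining hinv
    obtain ⟨hus, hrem⟩ := hinv
    simp only [List.foldl_cons, pvLoopB]
    rw [← hus s.1]
    cases hcs : PySem.Set.contains stA.2.1 s.1
    · -- not a used start: compare the selections
      have hsel : remaining.find? (fun e => decide (e.1 > s.1) && (e.2.2.2 == s.2.2.2))
          = PySem.List.min? (ep.filter
              (fun e => (decide (e.1 > s.1) && !(PySem.Set.contains stA.2.2 e.1)) && (e.2.2.2 == s.2.2.2)))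
              (fun x => x.1) := by
        rw [hrem, pv_find?_filter, pv_find?_sorted_eq_min?_filter]
        congr 1
        apply List.filter_congr
        intro a _
        cases (decide (a.1 > s.1) : Bool) <;> cases PySem.Set.contains stA.2.2 a.1 <;>
          cases (a.2.2.2 == s.2.2.2 : Bool) <;> rfl
      have hA : pvStepA ep stA s
          = match PySem.List.min? (ep.filter
              (fun e => (decide (e.1 > s.1) && !(PySem.Set.contains stA.2.2 e.1)) && (e.2.2.2 == s.2.2.2)))
              (fun x => x.1) with
            | none => stA
            | some e => (stA.1 ++ [(s.1, e.1, s.2.1, e.2.1, s.2.2.1, e.2.2.1, s.2.2.2)],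
                 PySem.Set.add stA.2.1 s.1, PySem.Set.add stA.2.2 e.1) := by
        simp only [pvStepA, hcs, Bool.false_eq_true, if_false]
      rw [hsel, hA]
      simp only [Bool.false_eq_true, if_false]
      rcases hmin : PySem.List.min? (ep.filter
          (fun e => (decide (e.1 > s.1) && !(PySem.Set.contains stA.2.2 e.1)) && (e.2.2.2 == s.2.2.2)))
          (fun x => x.1) with _ | e <;> rw [hmin]
      · exact ih stA remaining ⟨hus, hrem⟩
      · -- matched: re-establish the invariant for the updated states
        apply ih
        constructor
        · intro x
          rw [pv_contains_add, hus x, Bool.eq_iff_iff]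
          simp only [List.any_append, List.any_cons, List.any_nil, Bool.or_false,
            Bool.or_eq_true, beq_iff_eq]
          constructor
          · rintro (h | h)
            · exact Or.inl h
            · exact Or.inr h.symm
          · rintro (h | h)
            · exact Or.inl h
            · exact Or.inr h.symm
        · rw [hrem, List.filter_filter]
          apply List.filter_congr
          intro a _
          rw [pv_contains_add]
          cases hc : PySem.Set.contains stA.2.2 a.1 <;>
            cases he : (a.1 == e.1 : Bool) <;> simp
    · -- used start: both skip
      have hA : pvStepA ep stA s = stA := by unfold pvStepA; rw [if_pos hcs]
      rw [hA, if_pos rfl]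
      exact ih stA remaining ⟨hus, hrem⟩

-- ===== VERDICT (by name: the statement is the Claim_ definition above) =====
theorem match_record_pairs_spec : Claim_equal_match_record_pairs := by
  intro sp ep _
  unfold Spec_match_record_pairs match_record_pairs match_record_pairs_alt
  apply pv_sim
  constructor
  · intro x; rfl
  · simp [PySem.Set.empty, PySem.Set.contains_eq_listContains]
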